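-- pv_equiv track=rewrite | github.com/Cryst67/KattisSolutions | src/problems/highesthill/solutions/highesthill_1.py | find_biggest_peak
-- ===== SOURCE A (Python) =====
-- def find_biggest_peak(l):
--     n = len(l)
--     max_peak = 0
--
--     for i in range(1, n - 1):
--         if l[i - 1] <= l[i] >= l[i + 1]:
--             left_min, right_min = l[i - 1], l[i + 1]
--             j, k = i - 1, i + 1
--
--             while j > 0 and l[j - 1] <= l[j]:
--                 j -= 1
--                 left_min = min(left_min, l[j])
--
--             while k < n - 1 and l[k + 1] <= l[k]:
--                 k += 1
--                 right_min = min(right_min, l[k])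
--
--             peak = min(l[i] - left_min, l[i] - right_min)
--             max_peak = max(max_peak, peak)
--
--     return max_peak
-- ===== SOURCE B (Python) =====
-- def find_biggest_peak(l):
--     n = len(l)
--     # L[i]: min over the maximal ascending run ending at i (left to right)
--     L = [0] * n
--     for i in range(n):
--         if i > 0 and l[i - 1] <= l[i]:
--             L[i] = min(L[i - 1], l[i])
--         else:
--             L[i] = l[i]
--     # R[i]: min over the maximal descending run starting at i (right to left)
--     R = [0] * n
--     for i in range(n - 1, -1, -1):
--         if i < n - 1 and l[i + 1] <= l[i]:
--             R[i] = min(R[i + 1], l[i])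
--         else:
--             R[i] = l[i]
--     best = 0
--     for i in range(1, n - 1):
--         if l[i - 1] <= l[i] >= l[i + 1]:
--             best = max(best, min(l[i] - L[i - 1], l[i] - R[i + 1]))
--     return best
-- ===== Notes on version B (the rewrite author's own statement) =====
-- stated objective: faster
-- what changed: Replaced A's per-peak inner while-loop scans of the adjacent ascending/descending runs with two linear passes that precompute left/right run-minimum tables, so each peak is evaluated in O(1).
import Mathlib
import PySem

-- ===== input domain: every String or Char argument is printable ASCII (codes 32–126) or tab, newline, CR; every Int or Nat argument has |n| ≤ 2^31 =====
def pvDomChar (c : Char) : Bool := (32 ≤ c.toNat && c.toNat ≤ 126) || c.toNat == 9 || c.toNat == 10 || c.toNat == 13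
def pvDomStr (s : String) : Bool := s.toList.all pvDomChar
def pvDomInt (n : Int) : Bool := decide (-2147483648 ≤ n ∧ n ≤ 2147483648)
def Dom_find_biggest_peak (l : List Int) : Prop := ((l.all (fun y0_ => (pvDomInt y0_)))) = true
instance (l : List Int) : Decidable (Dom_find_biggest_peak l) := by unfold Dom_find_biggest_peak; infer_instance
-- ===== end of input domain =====

-- B replaces A's per-peak inner while-loop scans by two linear passes that precompute
-- the ascending/descending run minima, then reads each peak off the tables.

-- ===== PORT A =====
-- A's first while loop: j starts at i-1, walks left while j > 0 and l[j-1] <= l[j],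
-- accumulating left_min (all indexing stays in range, so getD 0 is exact).
def pvLeftLoop (l : List Int) (j : Nat) (lm : Int) : Int :=
  match j with
  | 0 => lm
  | j' + 1 =>
    if l.getD j' 0 ≤ l.getD (j' + 1) 0 then pvLeftLoop l j' (min lm (l.getD j' 0))
    else lm

-- A's second while loop: k walks right while k < n-1 and l[k+1] <= l[k], accumulating right_min.
def pvRightLoop (l : List Int) (k : Nat) (rm : Int) : Int :=
  if h : k + 1 < l.length ∧ l.getD (k + 1) 0 ≤ l.getD k 0 then
    pvRightLoop l (k + 1) (min rm (l.getD (k + 1) 0))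
  else rm
termination_by l.length - k
decreasing_by omega

def find_biggest_peak (l : List Int) : Int :=
  let n := l.length
  (List.range' 1 (n - 2)).foldl
    (fun max_peak i =>
      if l.getD (i - 1) 0 ≤ l.getD i 0 ∧ l.getD (i + 1) 0 ≤ l.getD i 0 then
        let left_min := pvLeftLoop l (i - 1) (l.getD (i - 1) 0)
        let right_min := pvRightLoop l (i + 1) (l.getD (i + 1) 0)
        max max_peak (min (l.getD i 0 - left_min) (l.getD i 0 - right_min))
      else max_peak)
    0

-- ===== PORT B =====
-- B's forward pass: L[i] = min(L[i-1], l[i]) if i > 0 and l[i-1] <= l[i] else l[i];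
-- carried state = previous element and previous L-value.
def pvBuildLGo (pe pL : Int) : List Int → List Int
  | [] => []
  | y :: ys =>
    (if pe ≤ y then min pL y else y) :: pvBuildLGo y (if pe ≤ y then min pL y else y) ys

def pvBuildL : List Int → List Int
  | [] => []
  | x :: xs => x :: pvBuildLGo x x xs

-- B's backward pass: R[i] = min(R[i+1], l[i]) if i < n-1 and l[i+1] <= l[i] else l[i],
-- built back-to-front.
def pvBuildR : List Int → List Int
  | [] => []
  | [x] => [x]
  | x :: y :: ys =>
    match pvBuildR (y :: ys) with
    | r :: rs => (if y ≤ x then min x r else x) :: r :: rs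
    | [] => [x]

def find_biggest_peak_alt (l : List Int) : Int :=
  let n := l.length
  let L := pvBuildL l
  let R := pvBuildR l
  (List.range' 1 (n - 2)).foldl
    (fun best i =>
      if l.getD (i - 1) 0 ≤ l.getD i 0 ∧ l.getD (i + 1) 0 ≤ l.getD i 0 then
        max best (min (l.getD i 0 - L.getD (i - 1) 0) (l.getD i 0 - R.getD (i + 1) 0))
      else best)
    0

-- ===== PRECONDITION & SPEC =====
def Spec_find_biggest_peak (l : List Int) (out : Int) : Prop := out = find_biggest_peak_alt l
instance (l : List Int) (out : Int) : Decidable (Spec_find_biggest_peak l out) := by unfold Spec_find_biggest_peak; infer_instance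

-- ===== CLAIM (what is proved, stated in full; the proofs are below) =====
def Claim_equal_find_biggest_peak : Prop := ∀ (l : List Int), Dom_find_biggest_peak l → Spec_find_biggest_peak l (find_biggest_peak l)

-- ===== LEMMAS AND PROOFS =====

-- reference recurrences for the two run-minima tables
def pvLfun (l : List Int) : Nat → Int
  | 0 => l.getD 0 0
  | j + 1 => if l.getD j 0 ≤ l.getD (j + 1) 0 then min (pvLfun l j) (l.getD (j + 1) 0)
             else l.getD (j + 1) 0

def pvRfun (l : List Int) (j : Nat) : Int :=
  if h : j + 1 < l.length ∧ l.getD (j + 1) 0 ≤ l.getD j 0 then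
    min (pvRfun l (j + 1)) (l.getD j 0)
  else l.getD j 0
termination_by l.length - j
decreasing_by omega

theorem pvRfun_eq (l : List Int) (j : Nat) :
    pvRfun l j = if j + 1 < l.length ∧ l.getD (j + 1) 0 ≤ l.getD j 0 then
      min (pvRfun l (j + 1)) (l.getD j 0) else l.getD j 0 := by
  by_cases h : j + 1 < l.length ∧ l.getD (j + 1) 0 ≤ l.getD j 0
  · rw [pvRfun, dif_pos h, if_pos h]
  · rw [pvRfun, dif_neg h, if_neg h]

theorem pvRightLoop_unfold (l : List Int) (k : Nat) (rm : Int) :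
    pvRightLoop l k rm = if k + 1 < l.length ∧ l.getD (k + 1) 0 ≤ l.getD k 0 then
      pvRightLoop l (k + 1) (min rm (l.getD (k + 1) 0)) else rm := by
  by_cases h : k + 1 < l.length ∧ l.getD (k + 1) 0 ≤ l.getD k 0
  · rw [pvRightLoop, dif_pos h, if_pos h]
  · rw [pvRightLoop, dif_neg h, if_neg h]

theorem pvLfun_le (l : List Int) (j : Nat) : pvLfun l j ≤ l.getD j 0 := by
  cases j with
  | zero => simp [pvLfun]
  | succ j' =>
    simp only [pvLfun]
    split <;> simp

theorem pvRfun_le (l : List Int) (j : Nat) : pvRfun l j ≤ l.getD j 0 := by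
  rw [pvRfun_eq]
  split <;> simp

theorem pvLeftLoop_eq (l : List Int) (j : Nat) : ∀ lm : Int,
    pvLeftLoop l j (min lm (l.getD j 0)) = min lm (pvLfun l j) := by
  induction j with
  | zero => intro lm; simp [pvLeftLoop, pvLfun]
  | succ j' ih =>
    intro lm
    simp only [pvLeftLoop, pvLfun]
    split
    · rw [ih (min lm (l.getD (j' + 1) 0)), min_assoc, min_comm (l.getD (j' + 1) 0)]
    · rfl

theorem pvLeftLoop_start (l : List Int) (j : Nat) :
    pvLeftLoop l j (l.getD j 0) = pvLfun l j := by
  have h := pvLeftLoop_eq l j (l.getD j 0)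
  rw [min_self] at h
  rw [h, min_eq_right (pvLfun_le l j)]

theorem pvRightLoop_eq (l : List Int) : ∀ (f j : Nat), l.length - j ≤ f → ∀ lm : Int,
    pvRightLoop l j (min lm (l.getD j 0)) = min lm (pvRfun l j) := by
  intro f
  induction f with
  | zero =>
    intro j hj lm
    rw [pvRightLoop_unfold, pvRfun_eq]
    have hn : ¬ (j + 1 < l.length ∧ l.getD (j + 1) 0 ≤ l.getD j 0) := by
      intro ⟨h1, _⟩; omega
    rw [if_neg hn, if_neg hn]
  | succ f' ih =>
    intro j hj lm
    rw [pvRightLoop_unfold, pvRfun_eq]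
    by_cases h : j + 1 < l.length ∧ l.getD (j + 1) 0 ≤ l.getD j 0
    · rw [if_pos h, if_pos h]
      rw [ih (j + 1) (by omega) (min lm (l.getD j 0)), min_assoc, min_comm (l.getD j 0)]
    · rw [if_neg h, if_neg h]

theorem pvRightLoop_start (l : List Int) (j : Nat) :
    pvRightLoop l j (l.getD j 0) = pvRfun l j := by
  have h := pvRightLoop_eq l l.length j (by omega) (l.getD j 0)
  rw [min_self] at h
  rw [h, min_eq_right (pvRfun_le l j)]

theorem pvDrop_cons (l : List Int) (i : Nat) (h : i < l.length) :
    l.drop i = l.getD i 0 :: l.drop (i + 1) := by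
  rw [List.drop_eq_getElem_cons h, List.getD_eq_getElem l 0 h]

theorem pvBuildLGo_spec (l : List Int) : ∀ (j i : Nat), i + 1 + j < l.length →
    (pvBuildLGo (l.getD i 0) (pvLfun l i) (l.drop (i + 1))).getD j 0 = pvLfun l (i + 1 + j) := by
  intro j
  induction j with
  | zero =>
    intro i hi
    rw [pvDrop_cons l (i + 1) (by omega)]
    simp only [pvBuildLGo, List.getD_cons_zero]
    simp [pvLfun]
  | succ j' ih =>
    intro i hi
    rw [pvDrop_cons l (i + 1) (by omega)]
    simp only [pvBuildLGo, List.getD_cons_succ]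
    have hv : (if l.getD i 0 ≤ l.getD (i + 1) 0 then min (pvLfun l i) (l.getD (i + 1) 0)
        else l.getD (i + 1) 0) = pvLfun l (i + 1) := by simp [pvLfun]
    rw [hv]
    have h2 := ih (i + 1) (by omega)
    have harith : i + 1 + 1 + j' = i + 1 + (j' + 1) := by omega
    rw [harith] at h2
    exact h2

theorem pvBuildL_getD (l : List Int) (j : Nat) (hj : j < l.length) :
    (pvBuildL l).getD j 0 = pvLfun l j := by
  cases l with
  | nil => simp at hj
  | cons x xs =>
    cases j with
    | zero => simp [pvBuildL, pvLfun]
    | succ j' =>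
      simp only [pvBuildL, List.getD_cons_succ]
      have h0 : pvLfun (x :: xs) 0 = x := by simp [pvLfun]
      have hx : (x :: xs).getD 0 0 = x := rfl
      have hdrop : (x :: xs).drop 1 = xs := rfl
      have hlen : 0 + 1 + j' < (x :: xs).length := by
        simp only [List.length_cons] at hj ⊢; omega
      have h2 := pvBuildLGo_spec (x :: xs) j' 0 hlen
      rw [h0, hx, hdrop] at h2
      have harith : 0 + 1 + j' = j' + 1 := by omega
      rw [harith] at h2
      exact h2

theorem pvBuildR_cons_ne_nil (a : Int) (as : List Int) : pvBuildR (a :: as) ≠ [] := by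
  cases as with
  | nil => simp [pvBuildR]
  | cons b bs =>
    simp only [pvBuildR]
    cases pvBuildR (b :: bs) <;> simp

theorem pvRfun_cons (x : Int) (xs : List Int) : ∀ (f j : Nat), xs.length - j ≤ f →
    pvRfun (x :: xs) (j + 1) = pvRfun xs j := by
  intro f
  induction f with
  | zero =>
    intro j hj
    rw [pvRfun_eq (x :: xs) (j + 1), pvRfun_eq xs j]
    have h1 : ¬ (j + 1 < xs.length ∧ xs.getD (j + 1) 0 ≤ xs.getD j 0) := by
      intro ⟨h, _⟩; omega
    have h2 : ¬ (j + 1 + 1 < (x :: xs).length ∧ (x :: xs).getD (j + 1 + 1) 0 ≤ (x :: xs).getD (j + 1) 0) := by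
      intro ⟨h, _⟩; simp only [List.length_cons] at h; omega
    rw [if_neg h2, if_neg h1]
    simp
  | succ f' ih =>
    intro j hj
    rw [pvRfun_eq (x :: xs) (j + 1), pvRfun_eq xs j]
    have hgd1 : (x :: xs).getD (j + 1 + 1) 0 = xs.getD (j + 1) 0 := by simp
    have hgd2 : (x :: xs).getD (j + 1) 0 = xs.getD j 0 := by simp
    by_cases h : j + 1 < xs.length ∧ xs.getD (j + 1) 0 ≤ xs.getD j 0
    · have h2 : j + 1 + 1 < (x :: xs).length ∧ (x :: xs).getD (j + 1 + 1) 0 ≤ (x :: xs).getD (j + 1) 0 := by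
        refine ⟨by simp only [List.length_cons]; omega, ?_⟩
        rw [hgd1, hgd2]; exact h.2
      rw [if_pos h2, if_pos h, ih (j + 1) (by omega), hgd2]
    · have h2 : ¬ (j + 1 + 1 < (x :: xs).length ∧ (x :: xs).getD (j + 1 + 1) 0 ≤ (x :: xs).getD (j + 1) 0) := by
        intro ⟨ha, hb⟩
        refine h ⟨?_, ?_⟩
        · simp only [List.length_cons] at ha; omega
        · rw [hgd1, hgd2] at hb; exact hb
      rw [if_neg h2, if_neg h, hgd2]

theorem pvBuildR_getD (l : List Int) : ∀ (j : Nat), j < l.length →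
    (pvBuildR l).getD j 0 = pvRfun l j := by
  induction l with
  | nil => intro j hj; simp at hj
  | cons x xs ihl =>
    intro j hj
    cases xs with
    | nil =>
      have hj0 : j = 0 := by simp only [List.length_cons, List.length_nil] at hj; omega
      subst hj0
      rw [pvRfun_eq]
      have hn : ¬ (0 + 1 < ([x] : List Int).length ∧ ([x] : List Int).getD (0 + 1) 0 ≤ ([x] : List Int).getD 0 0) := by
        intro ⟨h, _⟩; simp at h
      rw [if_neg hn]
      simp [pvBuildR]
    | cons y ys =>
      have hne := pvBuildR_cons_ne_nil y ys
      obtain ⟨r, rs, hrr⟩ : ∃ r rs, pvBuildR (y :: ys) = r :: rs := by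
        cases h : pvBuildR (y :: ys) with
        | nil => exact absurd h hne
        | cons a as => exact ⟨a, as, rfl⟩
      have hBR : pvBuildR (x :: y :: ys) = (if y ≤ x then min x r else x) :: r :: rs := by
        simp only [pvBuildR, hrr]
      cases j with
      | zero =>
        rw [hBR]
        simp only [List.getD_cons_zero]
        have hr0 : r = pvRfun (y :: ys) 0 := by
          have h3 := ihl 0 (by simp)
          rw [hrr] at h3
          simpa using h3
        have h1 : pvRfun (x :: y :: ys) 1 = pvRfun (y :: ys) 0 :=
          pvRfun_cons x (y :: ys) (y :: ys).length 0 (by omega)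
        rw [pvRfun_eq]
        by_cases hyx : y ≤ x
        · have hcond : 0 + 1 < (x :: y :: ys).length ∧ (x :: y :: ys).getD (0 + 1) 0 ≤ (x :: y :: ys).getD 0 0 := by
            refine ⟨by simp, ?_⟩
            simpa using hyx
          rw [if_pos hcond, if_pos hyx, hr0, ← h1]
          have hx0 : (x :: y :: ys).getD 0 0 = x := rfl
          rw [hx0, min_comm]
        · have hcond : ¬ (0 + 1 < (x :: y :: ys).length ∧ (x :: y :: ys).getD (0 + 1) 0 ≤ (x :: y :: ys).getD 0 0) := by
            intro ⟨_, hb⟩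
            exact hyx (by simpa using hb)
          rw [if_neg hcond, if_neg hyx]
          rfl
      | succ j' =>
        rw [hBR]
        simp only [List.getD_cons_succ]
        have hj' : j' < (y :: ys).length := by
          simp only [List.length_cons] at hj ⊢; omega
        have h3 := ihl j' hj'
        rw [hrr] at h3
        rw [h3]
        exact (pvRfun_cons x (y :: ys) (y :: ys).length j' (by omega)).symm

theorem find_biggest_peak_eq (l : List Int) : find_biggest_peak l = find_biggest_peak_alt l := by
  unfold find_biggest_peak find_biggest_peak_alt
  apply PySem.List.foldl_congr_mem
  intro acc i hi
  rw [List.mem_range'_1] at hi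
  obtain ⟨h1, h2⟩ := hi
  by_cases hc : l.getD (i - 1) 0 ≤ l.getD i 0 ∧ l.getD (i + 1) 0 ≤ l.getD i 0
  · rw [if_pos hc, if_pos hc]
    rw [pvLeftLoop_start, pvRightLoop_start]
    rw [pvBuildL_getD l (i - 1) (by omega), pvBuildR_getD l (i + 1) (by omega)]
  · rw [if_neg hc, if_neg hc]

-- ===== VERDICT (by name: the statement is the Claim_ definition above) =====
theorem find_biggest_peak_spec : Claim_equal_find_biggest_peak := by
  intro l _
  unfold Spec_find_biggest_peak
  exact find_biggest_peak_eq l
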